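-- pv_equiv track=rewrite | github.com/edt-yxz-zzd/python3_src | nn_ns/math_nn/group/FinitePermutation.py | permutation_cycles2mapping
-- ===== SOURCE A (Python) =====
-- def is_tuple(obj):
--     return type(obj) is tuple
--
-- def is_cycle(cycle):
--     return is_tuple(cycle) and len(set(cycle)) == len(cycle)
--
-- def is_2cycle(cycle):
--     return is_cycle(cycle) and len(cycle) == 2
--
-- def _is_cycles(cycles, *, all_2cycles):
--     return is_tuple(cycles) and all(map(is_2cycle if all_2cycles else is_cycle, cycles))
--
-- def is_cycles(cycles, *, all_2cycles=False):
--     return _is_cycles(cycles, all_2cycles=all_2cycles)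
--
-- def is_permutation_mapping(m):
--     'precondition: m is a mapping'
--     return set(m.keys()) == set(m.values()) and all(k != v for k, v in m.items())
--
-- def permutation_cycles2mapping(cycles):
--     r'''precondition: is_cycles
--
-- r = (As...,v,v_)(Bs...,k,v)
--     As /-\ Bs == {}
--     r(k) = v_
--     r(v_) = As[0]
--     r(v) = Bs[0]
--     r = (k,v_,As...,v,Bs...)
--          ^^^        ^^^
--
-- '''
--     assert is_cycles(cycles)
--
--     m = {}
--     tmp = {}
--     def put(k, v):
--         v_ = m.get(v, v)
--         tmp[k] = v_
--     for cycle in cycles: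
--         if len(cycle) < 2: continue
--         a0 = cycle[-1]
--
--         k = a0
--         for v in cycle:
--             put(k, v)
--             k = v
--         m.update(tmp)
--         tmp.clear()
--
--     #print_err(m)
--     assert is_permutation_mapping(m)
--     return m
-- ===== SOURCE B (Python) =====
-- def is_tuple(obj):
--     return type(obj) is tuple
--
-- def is_cycle(cycle):
--     return is_tuple(cycle) and len(set(cycle)) == len(cycle)
--
-- def is_2cycle(cycle):
--     return is_cycle(cycle) and len(cycle) == 2
--
-- def _is_cycles(cycles, *, all_2cycles):
--     return is_tuple(cycles) and all(map(is_2cycle if all_2cycles else is_cycle, cycles))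
--
-- def is_cycles(cycles, *, all_2cycles=False):
--     return _is_cycles(cycles, all_2cycles=all_2cycles)
--
-- def is_permutation_mapping(m):
--     'precondition: m is a mapping'
--     return set(m.keys()) == set(m.values()) and all(k != v for k, v in m.items())
--
-- def permutation_cycles2mapping(cycles):
--     '''precondition: is_cycles
--     Build one successor dict per cycle of length >= 2, then compose them
--     element-wise: each element goes through the cycles right-to-left.'''
--     assert is_cycles(cycles)
--     dicts = []
--     for cycle in cycles:
--         if len(cycle) < 2:
--             continue
--         d = {}
--         prev = cycle[-1]
--         for x in cycle:
--             d[prev] = x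
--             prev = x
--         dicts.append(d)
--     m = {}
--     for d in dicts:
--         for x in d:
--             v = x
--             for cyc in reversed(dicts):
--                 v = cyc.get(v, v)
--             m[x] = v
--     assert is_permutation_mapping(m)
--     return m
-- ===== Notes on version B (the rewrite author's own statement) =====
-- stated objective: alternative
-- what changed: A folds the cycles into one accumulator dict, rewriting each cycle through a tmp buffer whose values are looked up in the partial result (put/m.update); B first builds an independent successor dict per cycle of length >= 2 and then computes the mapping element-wise, sending each key through all cycle dicts right-to-left.
import Mathlib
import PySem

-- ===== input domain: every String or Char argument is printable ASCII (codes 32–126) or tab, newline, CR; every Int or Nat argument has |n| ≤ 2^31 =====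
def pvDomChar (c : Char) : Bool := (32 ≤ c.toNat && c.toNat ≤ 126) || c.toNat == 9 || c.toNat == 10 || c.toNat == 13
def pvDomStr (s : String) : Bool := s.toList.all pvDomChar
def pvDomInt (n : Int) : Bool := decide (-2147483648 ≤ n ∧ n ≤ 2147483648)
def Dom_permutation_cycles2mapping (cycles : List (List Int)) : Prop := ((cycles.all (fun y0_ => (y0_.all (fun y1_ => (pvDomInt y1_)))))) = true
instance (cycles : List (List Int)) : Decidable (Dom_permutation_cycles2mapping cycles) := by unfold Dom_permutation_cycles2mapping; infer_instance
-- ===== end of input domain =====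

-- B replaces A's cycle-by-cycle dict accumulation (tmp buffer + m.update, values looked up in
-- the partial result) by building one successor dict per cycle and composing them element-wise
-- right-to-left (objective: alternative decomposition).


-- ===== PORT A =====
-- literal port of A: accumulator dict m, per-cycle tmp dict, put(k, v) = tmp[k] = m.get(v, v),
-- then m.update(tmp); cycles of length < 2 are skipped
def permutation_cycles2mapping (cycles : List (List Int)) : List (Int × Int) :=
  (cycles.foldl (fun (m : PySem.Dict Int Int) cycle =>
      if cycle.length < 2 then m
      else
        match PySem.List.pyGet? cycle (-1) with
        | none => m  -- unreachable: cycle.length ≥ 2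
        | some a0 =>
          let tmp := (cycle.foldl
            (fun (p : PySem.Dict Int Int × Int) v =>
              (p.1.insert p.2 (m.getD v v), v))
            (PySem.Dict.empty, a0)).1
          m.update tmp.items)
    PySem.Dict.empty).items

-- ===== PORT B =====
-- successor dict of one cycle: walk the cycle keeping the previous element
def mkSuccDict (cycle : List Int) : PySem.Dict Int Int :=
  match PySem.List.pyGet? cycle (-1) with
  | none => PySem.Dict.empty
  | some last =>
    (cycle.foldl (fun (p : PySem.Dict Int Int × Int) x => (p.1.insert p.2 x, x))
      (PySem.Dict.empty, last)).1

-- v = x; for cyc in reversed(dicts): v = cyc.get(v, v)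
def composeThrough (dicts : List (PySem.Dict Int Int)) (x : Int) : Int :=
  dicts.reverse.foldl (fun v cyc => cyc.getD v v) x

def permutation_cycles2mapping_alt (cycles : List (List Int)) : List (Int × Int) :=
  let dicts := cycles.foldl
    (fun (ds : List (PySem.Dict Int Int)) cycle =>
      if cycle.length < 2 then ds else ds ++ [mkSuccDict cycle]) []
  (dicts.foldl (fun (m : PySem.Dict Int Int) d =>
      d.keys.foldl (fun m x => m.insert x (composeThrough dicts x)) m)
    PySem.Dict.empty).items

-- ===== PRECONDITION & SPEC =====
-- mathematical model used by Pre_: the keys of a cycle's successor pairs in A's insertion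
-- order (last element first), the pairs themselves, one cycle applied to one element, and
-- the whole input composed (first cycle outermost)
def rotKeys (c : List Int) : List Int :=
  match c.getLast? with
  | none => []
  | some a => a :: c.dropLast

def rotPairs (c : List Int) : List (Int × Int) := (rotKeys c).zip c

def applyCycle (c : List Int) (x : Int) : Int :=
  ((rotPairs c).find? (fun p => p.1 == x)).elim x Prod.snd

def compAll (cycles : List (List Int)) (x : Int) : Int :=
  cycles.foldr (fun c v => applyCycle c v) x

-- Pre_ excludes exactly the inputs on which A raises AssertionError and returns nothing:
-- a cycle with a repeated element (is_cycles fails), or an input whose composed permutation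
-- has a fixed point on the support of the length-≥2 cycles (is_permutation_mapping fails,
-- e.g. ((1,2),(2,1))); A returns a value on every other input.
def Pre_permutation_cycles2mapping (cycles : List (List Int)) : Prop :=
  (∀ c ∈ cycles, c.Nodup) ∧
  ∀ x ∈ ((cycles.filter (fun c => decide (2 ≤ c.length))).flatten), compAll cycles x ≠ x
instance (cycles : List (List Int)) : Decidable (Pre_permutation_cycles2mapping cycles) := by
  unfold Pre_permutation_cycles2mapping; infer_instance

def pvWitness_permutation_cycles2mapping : List (List Int) := [[1, 2], [2, 3]]

def Spec_permutation_cycles2mapping (cycles : List (List Int)) (out : List (Int × Int)) : Prop := out = permutation_cycles2mapping_alt cycles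
instance (cycles : List (List Int)) (out : List (Int × Int)) : Decidable (Spec_permutation_cycles2mapping cycles out) := by unfold Spec_permutation_cycles2mapping; infer_instance

-- ===== CLAIM (what is proved, stated in full; the proofs are below) =====
def Claim_equal_permutation_cycles2mapping : Prop := ∀ (cycles : List (List Int)), Dom_permutation_cycles2mapping cycles → Pre_permutation_cycles2mapping cycles → Spec_permutation_cycles2mapping cycles (permutation_cycles2mapping cycles)

-- ===== LEMMAS AND PROOFS =====

-- ordered union: append the keys not seen yet, keeping first-appearance order
def appendNew (o : List Int) (ks : List Int) : List Int :=
  ks.foldl (fun o x => if x ∈ o then o else o ++ [x]) o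

-- the key order both programs produce: first appearance over the rotKeys of the kept cycles
def ordAll (cs : List (List Int)) (o : List Int) : List Int :=
  cs.foldl (fun o c => if c.length < 2 then o else appendNew o (rotKeys c)) o

lemma mem_appendNew : ∀ (ks o : List Int) (x : Int),
    x ∈ appendNew o ks ↔ x ∈ o ∨ x ∈ ks := by
  intro ks
  induction ks with
  | nil => intro o x; simp [appendNew]
  | cons k ks ih =>
    intro o x
    show x ∈ appendNew (if k ∈ o then o else o ++ [k]) ks ↔ _
    rw [ih]
    by_cases hk : k ∈ o
    · simp [hk]
      constructor
      · rintro (h | h) <;> tauto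
      · rintro (h | rfl | h) <;> tauto
    · simp [hk]
      constructor
      · rintro ((h | rfl) | h) <;> tauto
      · rintro (h | rfl | h) <;> tauto

lemma getLast?_some (c : List Int) (h : c ≠ []) : c.getLast? = some (c.getLast h) :=
  List.getLast?_eq_some_getLast h

lemma rotKeys_eq (c : List Int) (h : c ≠ []) : rotKeys c = c.getLast h :: c.dropLast := by
  unfold rotKeys; rw [getLast?_some c h]

lemma rotKeys_length (c : List Int) (h : c ≠ []) : (rotKeys c).length = c.length := by
  rw [rotKeys_eq c h]
  simp [List.length_dropLast]
  have := List.length_pos_iff.mpr h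
  omega

lemma rotKeys_perm (c : List Int) (h : c ≠ []) : (rotKeys c).Perm c := by
  rw [rotKeys_eq c h]
  conv_rhs => rw [← List.dropLast_append_getLast h]
  exact (List.perm_append_singleton _ _).symm

lemma map_fst_rotPairs (c : List Int) (h : c ≠ []) :
    (rotPairs c).map Prod.fst = rotKeys c := by
  unfold rotPairs
  exact List.map_fst_zip (le_of_eq (rotKeys_length c h))

-- find? of a key in a list characterised by membership
lemma find?_eq_self : ∀ (l : List Int) (y : Int),
    l.find? (fun x => x == y) = if y ∈ l then some y else none := by
  intro l
  induction l with
  | nil => intro y; simp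
  | cons a l ih =>
    intro y
    by_cases h : a = y
    · subst h; simp
    · rw [List.find?_cons_of_neg (by simpa using h), ih]
      simp [Ne.symm h]

lemma get?_mk_find : ∀ (ps : List (Int × Int)) (y : Int),
    (PySem.Dict.mk ps).get? y = (ps.find? (fun p => p.1 == y)).map Prod.snd := by
  intro ps
  induction ps with
  | nil => intro y; rfl
  | cons p ps ih =>
    intro y
    obtain ⟨k, v⟩ := p
    rw [PySem.Dict.get?_mk_cons]
    by_cases h : k = y
    · subst h; simp
    · rw [if_neg (by simpa using h), ih, List.find?_cons_of_neg (by simpa using h)]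

lemma getD_norm (ord : List Int) (g : Int → Int) (y d : Int) :
    (PySem.Dict.mk (ord.map (fun x => (x, g x)))).getD y d
      = if y ∈ ord then g y else d := by
  rw [PySem.Dict.getD_eq_get?_getD, get?_mk_find, List.find?_map]
  have : ((fun p : Int × Int => p.1 == y) ∘ fun x => (x, g x)) = fun x => x == y := rfl
  rw [this, find?_eq_self]
  by_cases h : y ∈ ord <;> simp [h]

lemma dict_eq_mk (m : PySem.Dict Int Int) (l : List (Int × Int)) (h : m.items = l) :
    m = PySem.Dict.mk l := PySem.Dict.ext h

-- applyCycle facts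
lemma applyCycle_not_mem (c : List Int) (x : Int) (h : x ∉ rotKeys c) :
    applyCycle c x = x := by
  unfold applyCycle
  have : (rotPairs c).find? (fun p => p.1 == x) = none := by
    rw [List.find?_eq_none]
    intro p hp
    obtain ⟨a, b⟩ := p
    have := (List.of_mem_zip hp).1
    simp only [beq_iff_eq]
    intro heq; exact h (heq ▸ this)
  rw [this]; rfl

lemma find?_first_of_nodup : ∀ (ps : List (Int × Int)) (p : Int × Int),
    (ps.map Prod.fst).Nodup → p ∈ ps → ps.find? (fun q => q.1 == p.1) = some p := by
  intro ps
  induction ps with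
  | nil => intro p _ h; simp at h
  | cons q ps ih =>
    intro p hnd hp
    rcases List.mem_cons.mp hp with rfl | hp'
    · simp
    · have hq : q.1 ≠ p.1 := by
        intro heq
        have : p.1 ∈ ps.map Prod.fst := List.mem_map_of_mem hp'
        simp only [List.map_cons, List.nodup_cons] at hnd
        exact hnd.1 (heq ▸ this)
      rw [List.find?_cons_of_neg (by simpa using hq)]
      exact ih p (by simp only [List.map_cons, List.nodup_cons] at hnd; exact hnd.2) hp'

lemma applyCycle_mem (c : List Int) (p : Int × Int)
    (hnd : (rotKeys c).Nodup) (hp : p ∈ rotPairs c) : applyCycle c p.1 = p.2 := by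
  unfold applyCycle
  have hfnd : ((rotPairs c).map Prod.fst).Nodup := by
    rcases eq_or_ne c [] with rfl | hne
    · simp [rotPairs, rotKeys]
    · rw [map_fst_rotPairs c hne]; exact hnd
  rw [find?_first_of_nodup (rotPairs c) p hfnd hp]
  rfl

lemma applyCycle_short (c : List Int) (x : Int) (h : c.length < 2) :
    applyCycle c x = x := by
  rcases c with _ | ⟨a, c⟩
  · simp [applyCycle, rotPairs, rotKeys]
  · rcases c with _ | ⟨b, c⟩
    · by_cases hax : a = x
      · subst hax; simp [applyCycle, rotPairs, rotKeys]
      · simp [applyCycle, rotPairs, rotKeys, List.find?, hax]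
    · simp at h

-- one insert keeps the normal form
lemma insert_norm (m : PySem.Dict Int Int) (ord : List Int) (g : Int → Int) (k v : Int)
    (hm : m.items = ord.map (fun x => (x, g x))) :
    (m.insert k v).items
      = (if k ∈ ord then ord else ord ++ [k]).map
          (fun x => (x, if x = k then v else g x)) := by
  have hkeys : m.keys = ord := by
    show m.items.map Prod.fst = ord
    rw [hm, List.map_map]
    have hid : (Prod.fst ∘ fun x : Int => (x, g x)) = id := rfl
    rw [hid, List.map_id]
  have hcont : m.contains k = decide (k ∈ ord) := by
    rw [PySem.Dict.contains_eq_decide_mem_keys, hkeys]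
  rw [PySem.Dict.items_insert, hcont]
  by_cases hk : k ∈ ord
  · rw [if_pos (by simpa using hk), if_pos hk, hm, List.map_map]
    refine List.map_congr_left (fun x hx => ?_)
    show (if x == k then (k, v) else (x, g x)) = (x, if x = k then v else g x)
    by_cases hxk : x = k
    · simp [hxk]
    · simp [hxk]
  · rw [if_neg (by simpa using hk), if_neg hk, hm, List.map_append]
    have : ∀ x ∈ ord, (x, g x) = (x, if x = k then v else g x) := by
      intro x hx
      have : x ≠ k := fun h => hk (h ▸ hx)
      simp [this]
    rw [List.map_congr_left this]
    simp

-- folding inserts of a pair list keeps the normal form, appending the new keys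
lemma foldl_insert_norm : ∀ (ps : List (Int × Int)) (m : PySem.Dict Int Int)
    (ord : List Int) (g h : Int → Int),
    m.items = ord.map (fun x => (x, g x)) →
    (∀ x, x ∉ ps.map Prod.fst → h x = g x) →
    (∀ p ∈ ps, h p.1 = p.2) →
    (ps.foldl (fun d p => d.insert p.1 p.2) m).items
      = (appendNew ord (ps.map Prod.fst)).map (fun x => (x, h x)) := by
  intro ps
  induction ps with
  | nil =>
    intro m ord g h hm h1 _
    simp only [List.foldl_nil, List.map_nil, appendNew, hm]
    exact List.map_congr_left (fun x _ => by rw [h1 x (by simp)])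
  | cons p ps ih =>
    intro m ord g h hm h1 h2
    obtain ⟨k, v⟩ := p
    rw [List.foldl_cons]
    have hstep := insert_norm m ord g k v hm
    have happ : appendNew ord (((k, v) :: ps).map Prod.fst)
        = appendNew (if k ∈ ord then ord else ord ++ [k]) (ps.map Prod.fst) := rfl
    rw [happ]
    refine ih (m.insert k v) _ (fun x => if x = k then v else g x) h hstep ?_ ?_
    · intro x hx
      show h x = if x = k then v else g x
      by_cases hxk : x = k
      · have hk := h2 (k, v) (by simp)
        simp only at hk
        simp [hxk, hk]
      · rw [h1 x (by simp [hxk, hx])]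
        simp [hxk]
    · intro q hq
      show h q.1 = q.2
      exact h2 q (by simp [hq])

-- the inner put-loop of both programs, as a fold of inserts of the rotation pairs
lemma inner_fold_eq (f : Int → Int) : ∀ (xs : List Int) (d : PySem.Dict Int Int) (k : Int),
    (xs.foldl (fun p v => (p.1.insert p.2 (f v), v)) (d, k)).1
      = ((k :: xs.dropLast).zip (xs.map f)).foldl (fun d p => d.insert p.1 p.2) d := by
  intro xs
  induction xs with
  | nil => intro d k; simp
  | cons x xs ih =>
    intro d k
    rw [List.foldl_cons, ih]
    rcases xs with _ | ⟨y, ys⟩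
    · simp
    · simp [List.zip_cons_cons]

lemma items_foldl_insert_pairs (ps : List (Int × Int))
    (hnd : (ps.map Prod.fst).Nodup) :
    (ps.foldl (fun d p => d.insert p.1 p.2) PySem.Dict.empty).items = ps := by
  have := PySem.Dict.items_foldl_insert_fresh ps Prod.fst Prod.snd PySem.Dict.empty
    (fun a _ => PySem.Dict.contains_empty (ν := Int) a.1) hnd
  simpa using this

lemma compAll_cons (c : List Int) (cs : List (List Int)) (x : Int) :
    compAll (c :: cs) x = applyCycle c (compAll cs x) := rfl

-- main invariant of A's fold: items stay an ordered map whose values compose the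
-- remaining cycles inside the already-accumulated function g
lemma A_inv : ∀ (cs : List (List Int)) (m : PySem.Dict Int Int)
    (ord : List Int) (g : Int → Int),
    (∀ c ∈ cs, c.Nodup) →
    m.items = ord.map (fun x => (x, g x)) →
    (∀ y, y ∉ ord → g y = y) →
    ((cs.foldl (fun (m : PySem.Dict Int Int) cycle =>
      if cycle.length < 2 then m
      else
        match PySem.List.pyGet? cycle (-1) with
        | none => m
        | some a0 =>
          let tmp := (cycle.foldl
            (fun (p : PySem.Dict Int Int × Int) v =>
              (p.1.insert p.2 (m.getD v v), v))
            (PySem.Dict.empty, a0)).1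
          m.update tmp.items) m)).items
      = (ordAll cs ord).map (fun x => (x, g (compAll cs x))) := by
  intro cs
  induction cs with
  | nil => intro m ord g _ hm _; simpa [ordAll, compAll] using hm
  | cons c cs ih =>
    intro m ord g hnd hm hg
    have hords : ordAll (c :: cs) ord
        = ordAll cs (if c.length < 2 then ord else appendNew ord (rotKeys c)) := rfl
    by_cases hlt : c.length < 2
    · rw [List.foldl_cons, if_pos hlt, ih m ord g (fun c' hc' => hnd c' (by simp [hc'])) hm hg]
      rw [hords, if_pos hlt]
      have hv : ∀ x, g (compAll (c :: cs) x) = g (compAll cs x) := by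
        intro x
        rw [compAll_cons, applyCycle_short c _ hlt]
      exact List.map_congr_left (fun x _ => by rw [hv x])
    · have h2 : 2 ≤ c.length := by omega
      have hne : c ≠ [] := by rintro rfl; simp at h2
      have hcnd : c.Nodup := hnd c (by simp)
      have hrnd : (rotKeys c).Nodup := ((rotKeys_perm c hne).nodup_iff).mpr hcnd
      rw [List.foldl_cons, if_neg hlt, PySem.List.pyGet?_neg_one, getLast?_some c hne]
      simp only []
      -- the tmp dict: its items are the rotation pairs with values pushed through m.getD
      have hmk := dict_eq_mk m _ hm
      have hgetD : ∀ v : Int, m.getD v v = g v := by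
        intro v
        rw [hmk, getD_norm]
        by_cases h : v ∈ ord
        · simp [h]
        · simp [h, hg v h]
      have htmp : (c.foldl (fun (p : PySem.Dict Int Int × Int) v =>
            (p.1.insert p.2 (m.getD v v), v)) (PySem.Dict.empty, c.getLast hne)).1
          = (((c.getLast hne :: c.dropLast).zip (c.map (fun v => m.getD v v))).foldl
              (fun d p => d.insert p.1 p.2) PySem.Dict.empty) :=
        inner_fold_eq (fun v => m.getD v v) c PySem.Dict.empty (c.getLast hne)
      have hzip : (c.getLast hne :: c.dropLast).zip (c.map (fun v => m.getD v v))
          = (rotPairs c).map (Prod.map id g) := by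
        rw [← rotKeys_eq c hne]
        have : c.map (fun v => m.getD v v) = c.map g :=
          List.map_congr_left (fun v _ => hgetD v)
        rw [this, rotPairs, List.zip_map_right]
      have hps_fst : ((rotPairs c).map (Prod.map id g)).map Prod.fst = rotKeys c := by
        rw [List.map_map]
        have : (Prod.fst ∘ Prod.map (@id Int) g) = Prod.fst := rfl
        rw [this, map_fst_rotPairs c hne]
      have htmpitems : ((c.foldl (fun (p : PySem.Dict Int Int × Int) v =>
            (p.1.insert p.2 (m.getD v v), v)) (PySem.Dict.empty, c.getLast hne)).1).items
          = (rotPairs c).map (Prod.map id g) := by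
        rw [htmp, hzip]
        exact items_foldl_insert_pairs _ (by rw [hps_fst]; exact hrnd)
      have hupd : ∀ (pairs : List (Int × Int)),
          PySem.Dict.update m pairs = pairs.foldl (fun d a => d.insert a.1 a.2) m :=
        fun _ => rfl
      rw [htmpitems, hupd]
      -- the update step: normal form with g' = g ∘ applyCycle c, order appendNew
      have hstep := foldl_insert_norm ((rotPairs c).map (Prod.map id g)) m ord g
        (fun x => g (applyCycle c x)) hm
        (by
          intro x hx
          rw [hps_fst] at hx
          show g (applyCycle c x) = g x
          rw [applyCycle_not_mem c x hx])
        (by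
          rintro p hp
          obtain ⟨q, hq, rfl⟩ := List.mem_map.mp hp
          have := applyCycle_mem c q hrnd hq
          simp [Prod.map, this])
      rw [hps_fst] at hstep
      -- recurse with the new order and value function
      have hfin := ih _ (appendNew ord (rotKeys c)) (fun x => g (applyCycle c x))
        (fun c' hc' => hnd c' (by simp [hc'])) hstep
        (by
          intro y hy
          rw [mem_appendNew] at hy
          rw [not_or] at hy
          show g (applyCycle c y) = y
          rw [applyCycle_not_mem c y hy.2, hg y hy.1])
      rw [hfin, hords, if_neg hlt]
      exact List.map_congr_left (fun x _ => by rw [compAll_cons])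

-- ===== B-side lemmas =====

lemma dicts_eq (cycles : List (List Int)) :
    cycles.foldl (fun ds c => if c.length < 2 then ds else ds ++ [mkSuccDict c]) []
      = (cycles.filter (fun c => decide (2 ≤ c.length))).map mkSuccDict := by
  have hfun : (fun (ds : List (PySem.Dict Int Int)) (c : List Int) =>
      if c.length < 2 then ds else ds ++ [mkSuccDict c])
      = (fun ds c => if (decide (2 ≤ c.length)) = true then ds ++ [mkSuccDict c] else ds) := by
    funext ds c
    by_cases h : c.length < 2
    · rw [if_pos h, if_neg (by simpa using (by omega : ¬ 2 ≤ c.length))]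
    · rw [if_neg h, if_pos (by simpa using (by omega : 2 ≤ c.length))]
  rw [hfun, PySem.List.foldl_append_if]
  simp

lemma mkSuccDict_items (c : List Int) (h2 : 2 ≤ c.length) (hnd : c.Nodup) :
    (mkSuccDict c).items = rotPairs c := by
  have hne : c ≠ [] := by rintro rfl; simp at h2
  have hrnd : (rotKeys c).Nodup := ((rotKeys_perm c hne).nodup_iff).mpr hnd
  unfold mkSuccDict
  rw [PySem.List.pyGet?_neg_one, getLast?_some c hne]
  simp only []
  rw [inner_fold_eq (fun x => x) c PySem.Dict.empty (c.getLast hne)]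
  have hid : (List.map (fun x : Int => x) c) = c := List.map_id' c
  rw [hid, ← rotKeys_eq c hne, ← rotPairs]
  exact items_foldl_insert_pairs _ (by rw [map_fst_rotPairs c hne]; exact hrnd)

lemma mkSuccDict_keys (c : List Int) (h2 : 2 ≤ c.length) (hnd : c.Nodup) :
    (mkSuccDict c).keys = rotKeys c := by
  have hne : c ≠ [] := by rintro rfl; simp at h2
  show (mkSuccDict c).items.map Prod.fst = _
  rw [mkSuccDict_items c h2 hnd, map_fst_rotPairs c hne]

lemma mkSuccDict_getD (c : List Int) (h2 : 2 ≤ c.length) (hnd : c.Nodup) (x : Int) :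
    (mkSuccDict c).getD x x = applyCycle c x := by
  rw [dict_eq_mk (mkSuccDict c) _ (mkSuccDict_items c h2 hnd)]
  unfold applyCycle
  rw [PySem.Dict.getD_eq_get?_getD, get?_mk_find]
  cases (rotPairs c).find? (fun p => p.1 == x) <;> simp

-- B's outer fold keeps the same normal form with the fixed value function F
lemma B_inv (F : Int → Int) : ∀ (ds : List (PySem.Dict Int Int))
    (m : PySem.Dict Int Int) (ord : List Int),
    m.items = ord.map (fun x => (x, F x)) →
    ((ds.foldl (fun m d => d.keys.foldl (fun m x => m.insert x (F x)) m) m)).items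
      = (ds.foldl (fun o d => appendNew o d.keys) ord).map (fun x => (x, F x)) := by
  intro ds
  induction ds with
  | nil => intro m ord hm; simpa using hm
  | cons d ds ih =>
    intro m ord hm
    rw [List.foldl_cons, List.foldl_cons]
    have hinner : d.keys.foldl (fun m x => m.insert x (F x)) m
        = (d.keys.map (fun x => (x, F x))).foldl (fun d p => d.insert p.1 p.2) m := by
      rw [List.foldl_map]
    have hstep := foldl_insert_norm (d.keys.map (fun x => (x, F x))) m ord F F hm
      (fun _ _ => rfl)
      (by rintro p hp; obtain ⟨x, _, rfl⟩ := List.mem_map.mp hp; rfl)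
    have hfst : (d.keys.map (fun x => (x, F x))).map Prod.fst = d.keys := by
      rw [List.map_map]
      have hid : (Prod.fst ∘ fun x : Int => (x, F x)) = id := rfl
      rw [hid, List.map_id]
    rw [hfst] at hstep
    rw [hinner] at *
    exact ih _ _ hstep

-- member-wise congruence for foldr (the value argument varies)
lemma foldr_congr_mem {α β : Type} (l : List α) (f g : α → β → β) (b : β)
    (h : ∀ a ∈ l, ∀ v, f a v = g a v) : l.foldr f b = l.foldr g b := by
  induction l with
  | nil => rfl
  | cons a l ih =>
    rw [List.foldr_cons, List.foldr_cons, ih (fun a' ha' => h a' (by simp [ha'])),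
      h a (by simp)]

lemma composeThrough_eq (cycles : List (List Int))
    (hnd : ∀ c ∈ cycles, c.Nodup) (x : Int) :
    composeThrough ((cycles.filter (fun c => decide (2 ≤ c.length))).map mkSuccDict) x
      = compAll cycles x := by
  unfold composeThrough
  rw [List.foldl_reverse, List.foldr_map]
  rw [foldr_congr_mem _ _ (fun c v => applyCycle c v) x
    (by
      intro c hc v
      have h2 : 2 ≤ c.length := by simpa using (List.mem_filter.mp hc).2
      exact mkSuccDict_getD c h2 (hnd c (List.mem_filter.mp hc).1) v)]
  rw [List.foldr_filter]
  unfold compAll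
  refine foldr_congr_mem _ _ _ x ?_
  intro c _ v
  by_cases h : 2 ≤ c.length
  · simp [h]
  · rw [if_neg (by simpa using h), applyCycle_short c v (by omega)]

lemma ordAll_filter (cycles : List (List Int)) (ord : List Int)
    (hnd : ∀ c ∈ cycles, c.Nodup) :
    ((cycles.filter (fun c => decide (2 ≤ c.length))).map mkSuccDict).foldl
        (fun o d => appendNew o d.keys) ord
      = ordAll cycles ord := by
  rw [List.foldl_map]
  rw [PySem.List.foldl_congr_mem _ _ (fun o c => appendNew o (rotKeys c)) ord
    (by
      intro acc c hc
      have h2 : 2 ≤ c.length := by simpa using (List.mem_filter.mp hc).2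
      rw [mkSuccDict_keys c h2 (hnd c (List.mem_filter.mp hc).1)])]
  rw [List.foldl_filter]
  unfold ordAll
  refine PySem.List.foldl_congr_mem _ _ _ ord ?_
  intro acc c _
  by_cases h : 2 ≤ c.length
  · rw [if_pos (by simpa using h), if_neg (by omega)]
  · rw [if_neg (by simpa using h), if_pos (by omega)]

-- ===== VERDICT (by name: the statement is the Claim_ definition above) =====
theorem permutation_cycles2mapping_spec : Claim_equal_permutation_cycles2mapping := by
  intro cycles _ hpre
  obtain ⟨hnd, _⟩ := hpre
  unfold Spec_permutation_cycles2mapping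
  unfold permutation_cycles2mapping permutation_cycles2mapping_alt
  rw [A_inv cycles PySem.Dict.empty [] id hnd (by simp [PySem.Dict.empty]) (fun _ _ => rfl)]
  simp only [dicts_eq]
  rw [B_inv (composeThrough ((cycles.filter (fun c => decide (2 ≤ c.length))).map mkSuccDict))
    _ PySem.Dict.empty [] (by simp [PySem.Dict.empty])]
  rw [ordAll_filter _ _ hnd]
  exact List.map_congr_left (fun x _ => by
    rw [composeThrough_eq cycles hnd x]; simp)
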